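-- pv_equiv track=rewrite | github.com/OSSP9/chat | gui_client.py | __data_to_list
-- ===== SOURCE A (Python) =====
-- def __data_to_list(decoded_data):
--     """
--     __get_data() 함수에서 쓰이는 함수
--     서버에서 받은 바이트를 디코딩한 메세지를 배열의 배열로 바꿔주는 역할
--     아주 큰 길이의 스트링을 작은 단위의 배열로 바꿔준다
--     파라미터 decoded_data: 스트링이고 각 자료는 ;로 나눠져있고 다른종류의 자료는 \n로 구분
--     """
--
--     # 디코딩된자료길이에서부터 -1까지 1씩 빼면서 루프
--     for index in range(len(decoded_data) - 1, -1, -1):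
--         if decoded_data[index] == '\n':
--             filtered_decoded_data = decoded_data[:index]
--             initial_list = filtered_decoded_data.split('\n')
--             final_list = [message.split(';') for message in initial_list]
--
--             return final_list
--
--     return []
-- ===== SOURCE B (Python) =====
-- def __data_to_list(decoded_data):
--     # Simpler: split once on '\n', drop the trailing segment after the last
--     # newline (A discards it too), then split each message on ';'.
--     return [message.split(';') for message in decoded_data.split('\n')[:-1]]
-- ===== Notes on version B (the rewrite author's own statement) =====
-- stated objective: simpler
-- what changed: B removes A's backward per-character index scan for the last newline and its guarded early return: it splits the whole string on the newline separator once and drops the final segment with a [:-1] slice, which also yields the empty list when no newline is present.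
import Mathlib
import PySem

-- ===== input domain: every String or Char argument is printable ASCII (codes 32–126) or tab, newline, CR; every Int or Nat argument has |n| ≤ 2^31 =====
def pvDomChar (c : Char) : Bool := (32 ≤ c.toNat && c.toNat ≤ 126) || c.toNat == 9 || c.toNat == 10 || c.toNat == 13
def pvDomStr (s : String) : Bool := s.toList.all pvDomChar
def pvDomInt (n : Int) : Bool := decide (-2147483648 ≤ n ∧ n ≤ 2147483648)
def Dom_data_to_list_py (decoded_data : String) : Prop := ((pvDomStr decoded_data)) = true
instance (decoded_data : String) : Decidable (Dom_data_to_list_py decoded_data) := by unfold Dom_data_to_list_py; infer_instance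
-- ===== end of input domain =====

-- B drops A's backward scan for the last newline: one split on '\n', slice off the last segment, split each message on ';' (simpler).

-- ===== PORT A =====
-- the descending 'for index in range(len-1, -1, -1)' loop with its early return:
-- aFindNl s n scans indices n-1, n-2, …, 0 and returns the first index holding '\n'
def aFindNl (s : List Char) : Nat → Option Nat
  | 0 => none
  | Nat.succ n => if s[n]? = some '\n' then some n else aFindNl s n

def data_to_list_py (decoded_data : String) : List (List String) :=
  match aFindNl decoded_data.toList decoded_data.toList.length with
  | some index =>
      -- filtered_decoded_data = decoded_data[:index]; split('\n'); each message split(';')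
      let filtered := PySem.List.slice decoded_data.toList none (some (index : Int))
      (PySem.Chars.splitOn filtered ['\n']).map
        (fun message => (PySem.Chars.splitOn message [';']).map String.ofList)
  | none => []

-- ===== PORT B =====
def data_to_list_py_alt (decoded_data : String) : List (List String) :=
  (PySem.List.slice (PySem.Chars.splitOn decoded_data.toList ['\n']) none (some (-1))).map
    (fun message => (PySem.Chars.splitOn message [';']).map String.ofList)

-- ===== PRECONDITION & SPEC =====
def Spec_data_to_list_py (decoded_data : String) (out : List (List String)) : Prop := out = data_to_list_py_alt decoded_data
instance (decoded_data : String) (out : List (List String)) : Decidable (Spec_data_to_list_py decoded_data out) := by unfold Spec_data_to_list_py; infer_instance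

-- ===== CLAIM (what is proved, stated in full; the proofs are below) =====
def Claim_equal_data_to_list_py : Prop := ∀ (decoded_data : String), Dom_data_to_list_py decoded_data → Spec_data_to_list_py decoded_data (data_to_list_py decoded_data)

-- ===== LEMMAS AND PROOFS =====

-- reference splitter for a single-character separator
def splits (c : Char) : List Char → List (List Char)
  | [] => [[]]
  | x :: xs => if x = c then [] :: splits c xs else (splits c xs).modifyHead (x :: ·)

theorem splits_ne_nil (c : Char) (l : List Char) : splits c l ≠ [] := by
  cases l with
  | nil => simp [splits]
  | cons x xs =>
      simp only [splits]
      split_ifs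
      · simp
      · cases h : splits c xs with
        | nil => exact absurd h (splits_ne_nil c xs)
        | cons y ys => simp

theorem go_spec (c : Char) (fuel : Nat) (l cur : List Char) (acc : List (List Char))
    (h : l.length ≤ fuel) :
    PySem.Chars.splitOn.go [c] fuel l cur acc
      = acc.reverse ++ (splits c l).modifyHead (cur.reverse ++ ·) := by
  induction fuel generalizing l cur acc with
  | zero =>
      have : l = [] := List.length_eq_zero_iff.mp (Nat.le_zero.mp h)
      subst this
      simp [PySem.Chars.splitOn.go, splits]
  | succ n ih =>
      cases l with
      | nil => simp [PySem.Chars.splitOn.go, splits]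
      | cons x rest =>
          simp only [PySem.Chars.splitOn.go]
          by_cases hx : x = c
          · subst hx
            have hpre : List.isPrefixOf [x] (x :: rest) = true := by
              simp [List.isPrefixOf]
            rw [if_pos hpre]
            simp only [List.length_cons, List.length_nil, List.drop_succ_cons, List.drop_zero]
            rw [ih rest [] (cur.reverse :: acc)
              (by simpa using Nat.le_of_succ_le_succ h)]
            cases hs : splits x rest with
            | nil => exact absurd hs (splits_ne_nil x rest)
            | cons y ys => simp [splits, hs]
          · have hpre : List.isPrefixOf [x] (x :: rest) = true := by
              simp [List.isPrefixOf]
            have hpre' : List.isPrefixOf [c] (x :: rest) = false := by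
              simp [List.isPrefixOf]
              intro hcx; exact absurd hcx.symm hx
            rw [if_neg (by simp [hpre'])]
            have := ih rest (x :: cur) acc (by simpa using Nat.le_of_succ_le_succ h)
            rw [this]
            cases hs : splits c rest with
            | nil => exact absurd hs (splits_ne_nil c rest)
            | cons y ys => simp [splits, hx, hs]

theorem splitOn_eq_splits (c : Char) (l : List Char) :
    PySem.Chars.splitOn l [c] = splits c l := by
  unfold PySem.Chars.splitOn
  rw [go_spec c (l.length + 1) l [] [] (Nat.le_succ _)]
  cases hs : splits c l with
  | nil => exact absurd hs (splits_ne_nil c l)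
  | cons y ys => simp

theorem splits_append (c : Char) (a b : List Char) :
    splits c (a ++ c :: b) = splits c a ++ splits c b := by
  induction a with
  | nil => simp [splits]
  | cons x xs ih =>
      by_cases hx : x = c
      · subst hx; simp [splits, ih]
      · simp only [List.cons_append, splits, if_neg hx, ih]
        cases hs : splits c xs with
        | nil => exact absurd hs (splits_ne_nil c xs)
        | cons y ys => simp

theorem splits_of_not_mem (c : Char) (l : List Char) (h : c ∉ l) : splits c l = [l] := by
  induction l with
  | nil => rfl
  | cons x xs ih =>
      have hx : x ≠ c := fun e => h (by simp [e])
      have hxs : c ∉ xs := fun e => h (by simp [e])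
      simp [splits, hx, ih hxs]

theorem aFindNl_none (s : List Char) (n : Nat) (hn : n ≤ s.length) (h : '\n' ∉ s) :
    aFindNl s n = none := by
  induction n with
  | zero => rfl
  | succ m ih =>
      simp only [aFindNl]
      rw [if_neg, ih (Nat.le_of_succ_le hn)]
      intro he
      exact h (List.mem_of_getElem? he)

theorem aFindNl_last (a b : List Char) (hb : '\n' ∉ b) (k : Nat) (hk : k ≤ b.length) :
    aFindNl (a ++ '\n' :: b) (a.length + 1 + k) = some a.length := by
  induction k with
  | zero =>
      simp only [aFindNl]
      rw [if_pos]
      simp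
  | succ m ih =>
      have : a.length + 1 + (m + 1) = Nat.succ (a.length + 1 + m) := by omega
      rw [this]
      simp only [aFindNl]
      rw [if_neg, ih (Nat.le_of_succ_le hk)]
      intro he
      have : b[m]? = some '\n' := by
        have h1 : (a ++ '\n' :: b)[a.length + 1 + m]? = ('\n' :: b)[1 + m]? := by
          rw [List.getElem?_append_right (by omega)]
          congr 1; omega
        have h2 : ('\n' :: b)[1 + m]? = b[m]? := by
          rw [Nat.add_comm]; simp
        rw [h1, h2] at he; exact he
      exact hb (List.mem_of_getElem? this)

theorem last_nl_decomp (l : List Char) (h : '\n' ∈ l) :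
    ∃ a b, l = a ++ '\n' :: b ∧ '\n' ∉ b := by
  induction l with
  | nil => cases h
  | cons x xs ih =>
      by_cases hx : '\n' ∈ xs
      · obtain ⟨a, b, hab, hb⟩ := ih hx
        exact ⟨x :: a, b, by simp [hab], hb⟩
      · have hx0 : x = '\n' := by
          rcases List.mem_cons.mp h with h1 | h2
          · exact h1.symm
          · exact absurd h2 hx
        exact ⟨[], xs, by simp [hx0], hx⟩

-- ===== VERDICT (by name: the statement is the Claim_ definition above) =====
theorem data_to_list_py_spec : Claim_equal_data_to_list_py := by
  intro s _
  unfold Spec_data_to_list_py data_to_list_py data_to_list_py_alt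
  rw [PySem.List.slice_to_neg_one, splitOn_eq_splits]
  by_cases h : '\n' ∈ s.toList
  · obtain ⟨a, b, hab, hb⟩ := last_nl_decomp s.toList h
    have hlen : s.toList.length = a.length + 1 + b.length := by simp [hab]; omega
    have hfind : aFindNl s.toList s.toList.length = some a.length := by
      rw [hlen, hab]; exact aFindNl_last a b hb b.length (le_refl _)
    rw [hfind]
    simp only [PySem.List.slice_to_natCast, splitOn_eq_splits]
    rw [hab, splits_append, splits_of_not_mem _ b hb, List.dropLast_concat]
    congr 1
    simp [List.take_left']
  · have hfind : aFindNl s.toList s.toList.length = none :=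
      aFindNl_none s.toList s.toList.length (le_refl _) h
    rw [hfind, splits_of_not_mem _ _ h]
    simp
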